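-- pv_equiv track=rewrite | github.com/the-omega-institute/automath | theory/2026_golden_ratio_driven_scan_projection_generation_recursive_emergence/scripts/exp_fold_zm_collision_s2_e2_field_isomorphism_audit.py | _cubic_splitting_type_mod_p
-- ===== SOURCE A (Python) =====
-- from typing import Dict, List, Tuple
--
-- def _eval_poly_mod(coeffs_desc: Tuple[int, ...], x: int, p: int) -> int:
--     """Evaluate a polynomial with integer coefficients (descending order) mod p."""
--     acc = 0
--     for c in coeffs_desc:
--         acc = (acc * x + c) % p
--     return acc
--
-- def _cubic_splitting_type_mod_p(coeffs_desc: Tuple[int, ...], p: int) -> str: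
--     """
--     Return the splitting type label for a cubic over F_p:
--       - "111" (fully split into 3 linear factors, distinct roots),
--       - "12"  (one linear factor and one irreducible quadratic),
--       - "3"   (irreducible),
--       - "bad" (has a repeated root; should only occur at discriminant primes).
--     """
--     roots = [x for x in range(p) if _eval_poly_mod(coeffs_desc, x, p) == 0]
--     if len(roots) == 0:
--         return "3"
--     if len(roots) == 1:
--         return "12"
--     if len(roots) == 3:
--         return "111"
--     return "bad"
-- ===== SOURCE B (Python) =====
-- def _eval_asc(coeffs_desc, x, p):
--     """Evaluate the polynomial at x mod p, ascending monomial order with a running power."""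
--     v = 0
--     pw = 1
--     for c in reversed(coeffs_desc):
--         v += c * pw
--         pw = pw * x % p
--     return v % p
--
-- def _cubic_splitting_type_mod_p(coeffs_desc, p):
--     """Classify the splitting type by scanning 0..p-1 with a forward-difference
--     table: each next value of f is obtained by additive difference updates
--     (no per-point Horner evaluation), then the root count is classified.
--     Only min(n, p) differences matter: entries above index p-1 can never
--     propagate down to the table head within p scan steps."""
--     n = len(coeffs_desc)
--     count = 0
--     if p >= 1:
--         if n == 0:
--             count = p
--         else:
--             m = min(n, p)
--             vals = [_eval_asc(coeffs_desc, x, p) for x in range(m)]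
--             table = []
--             while vals:
--                 table.append(vals[0])
--                 vals = [(vals[i + 1] - vals[i]) % p for i in range(len(vals) - 1)]
--             for _ in range(p):
--                 if table[0] == 0:
--                     count += 1
--                 for k in range(m - 1):
--                     table[k] = (table[k] + table[k + 1]) % p
--     return {0: "3", 1: "12", 3: "111"}.get(count, "bad")
-- ===== Notes on version B (the rewrite author's own statement) =====
-- stated objective: alternative
-- what changed: Replaces A's per-point Horner evaluation at every x in range(p) by a forward-difference table scan (values of f on 0..p-1 generated by additive difference updates after an O(deg^2) table setup), with dict-lookup classification of the root count instead of an if-chain.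
import Mathlib
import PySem

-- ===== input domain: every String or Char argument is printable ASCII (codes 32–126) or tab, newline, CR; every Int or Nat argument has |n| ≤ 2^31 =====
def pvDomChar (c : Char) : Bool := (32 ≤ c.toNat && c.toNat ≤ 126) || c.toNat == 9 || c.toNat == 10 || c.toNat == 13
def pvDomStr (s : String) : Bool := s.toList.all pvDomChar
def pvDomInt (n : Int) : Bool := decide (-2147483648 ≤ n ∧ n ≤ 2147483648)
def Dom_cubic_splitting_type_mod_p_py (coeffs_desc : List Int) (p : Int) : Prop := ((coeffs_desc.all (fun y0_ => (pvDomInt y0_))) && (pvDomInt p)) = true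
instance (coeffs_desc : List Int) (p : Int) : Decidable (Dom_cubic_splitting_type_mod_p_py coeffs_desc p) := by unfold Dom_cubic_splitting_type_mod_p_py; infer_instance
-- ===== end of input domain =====

-- B replaces A's per-point Horner evaluation over 0..p-1 by an additive forward-difference
-- table scan (alternative algorithm of similar cost; its one-off table setup is O(deg^2)).

-- ===== PORT A =====
-- acc = 0; for c in coeffs_desc: acc = (acc * x + c) % p
def evalPolyMod_py (coeffs_desc : List Int) (x : Int) (p : Int) : Int :=
  coeffs_desc.foldl (fun acc c => PySem.Int.mod (acc * x + c) p) 0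

def cubic_splitting_type_mod_p_py (coeffs_desc : List Int) (p : Int) : String :=
  let roots := (PySem.List.pyRange 0 p 1).filter (fun x => evalPolyMod_py coeffs_desc x p == 0)
  if roots.length == 0 then "3"
  else if roots.length == 1 then "12"
  else if roots.length == 3 then "111"
  else "bad"

-- ===== PORT B =====
-- v = 0; pw = 1; for c in reversed(coeffs_desc): v += c * pw; pw = pw * x % p; return v % p
def evalAsc_py (coeffs_desc : List Int) (x : Int) (p : Int) : Int :=
  PySem.Int.mod
    ((coeffs_desc.reverse.foldl
        (fun s c => (s.1 + c * s.2, PySem.Int.mod (s.2 * x) p)) ((0 : Int), (1 : Int))).1) p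

-- [(vals[i+1] - vals[i]) % p for i in range(len(vals) - 1)]
def bDiffs (p : Int) (vals : List Int) : List Int :=
  (PySem.List.pyRange 0 (PySem.List.len vals - 1) 1).map
    (fun i => PySem.Int.mod (PySem.List.pyGetD vals (i + 1) 0 - PySem.List.pyGetD vals i 0) p)

theorem length_bDiffs (p : Int) (vals : List Int) :
    (bDiffs p vals).length = vals.length - 1 := by
  simp [bDiffs, PySem.List.length_pyRange_one, PySem.List.len_eq]

-- table = []; while vals: table.append(vals[0]); vals = <differences>
def bTable (p : Int) : List Int → List Int
  | [] => []
  | v :: rest => v :: bTable p (bDiffs p (v :: rest))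
termination_by vals => vals.length
decreasing_by simp [length_bDiffs]

-- for k in range(n - 1): table[k] = (table[k] + table[k+1]) % p   (k ≥ 0, so .toNat is exact)
def bStep (n : Nat) (p : Int) (table : List Int) : List Int :=
  (PySem.List.pyRange 0 ((n : Int) - 1) 1).foldl
    (fun t k =>
      t.set k.toNat (PySem.Int.mod (PySem.List.pyGetD t k 0 + PySem.List.pyGetD t (k + 1) 0) p))
    table

def cubic_splitting_type_mod_p_py_alt (coeffs_desc : List Int) (p : Int) : String :=
  let n := coeffs_desc.length
  let count : Int :=
    if 1 ≤ p then
      if n = 0 then p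
      else
        let m : Int := min (n : Int) p
        let vals := (PySem.List.pyRange 0 m 1).map (fun x => evalAsc_py coeffs_desc x p)
        let table := bTable p vals
        ((PySem.List.pyRange 0 p 1).foldl
          (fun st _ =>
            (bStep m.toNat p st.1, if PySem.List.pyGetD st.1 0 0 == 0 then st.2 + 1 else st.2))
          (table, (0 : Int))).2
    else 0
  PySem.Dict.getD
    (((PySem.Dict.empty.insert (0 : Int) "3").insert 1 "12").insert 3 "111") count "bad"

-- ===== PRECONDITION & SPEC =====
def Spec_cubic_splitting_type_mod_p_py (coeffs_desc : List Int) (p : Int) (out : String) : Prop := out = cubic_splitting_type_mod_p_py_alt coeffs_desc p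
instance (coeffs_desc : List Int) (p : Int) (out : String) : Decidable (Spec_cubic_splitting_type_mod_p_py coeffs_desc p out) := by unfold Spec_cubic_splitting_type_mod_p_py; infer_instance

-- ===== CLAIM (what is proved, stated in full; the proofs are below) =====
def Claim_equal_cubic_splitting_type_mod_p_py : Prop := ∀ (coeffs_desc : List Int) (p : Int), Dom_cubic_splitting_type_mod_p_py coeffs_desc p → Spec_cubic_splitting_type_mod_p_py coeffs_desc p (cubic_splitting_type_mod_p_py coeffs_desc p)

-- ===== LEMMAS AND PROOFS =====


-- The exact integer Horner value of A's polynomial (descending coefficients).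
def pvHorner (coeffs : List Int) (x : Int) : Int := coeffs.foldl (fun a c => a * x + c) 0

theorem pvHorner_foldl (x : Int) (cs : List Int) : ∀ (a : Int),
    cs.foldl (fun a c => a * x + c) a = a * x ^ cs.length + pvHorner cs x := by
  induction cs with
  | nil => intro a; simp [pvHorner]
  | cons c t ih =>
    intro a
    have h1 := ih (a * x + c)
    have h2 := ih c
    simp only [List.foldl_cons, List.length_cons, pvHorner] at *
    rw [h1]
    rw [show (0 : Int) * x + c = c by ring] at *
    rw [h2]
    ring

theorem pvHorner_eq_sum (cs : List Int) (x : Int) :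
    pvHorner cs x = ∑ k ∈ Finset.range cs.length, cs.reverse.getD k 0 * x ^ k := by
  induction cs with
  | nil => simp [pvHorner]
  | cons c t ih =>
    have hcons : pvHorner (c :: t) x = c * x ^ t.length + pvHorner t x := by
      simp only [pvHorner, List.foldl_cons]
      rw [show (0 : Int) * x + c = c by ring]
      exact pvHorner_foldl x t c
    rw [hcons, ih]
    rw [List.length_cons, Finset.sum_range_succ]
    have hrev : (c :: t).reverse = t.reverse ++ [c] := by simp
    rw [hrev]
    have hlast : (t.reverse ++ [c]).getD t.length 0 = c := by
      rw [List.getD_append_right _ _ _ _ (by simp)]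
      simp
    have hinit : ∀ k ∈ Finset.range t.length,
        (t.reverse ++ [c]).getD k 0 * x ^ k = t.reverse.getD k 0 * x ^ k := by
      intro k hk
      rw [List.getD_append _ _ _ k (by simpa using Finset.mem_range.mp hk)]
    rw [Finset.sum_congr rfl hinit, hlast]
    ring

theorem pvFwd_top (coeffs : List Int) :
    (fwdDiff (1 : Int))^[coeffs.length] (pvHorner coeffs) = 0 := by
  have hfun : pvHorner coeffs =
      (fun r : Int => ∑ k ∈ Finset.range coeffs.length, coeffs.reverse.getD k 0 * r ^ k) := by
    funext x; exact pvHorner_eq_sum coeffs x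
  rw [hfun]
  exact fwdDiff_iter_sum_mul_pow_eq_zero _

theorem pvModEq_self (p a : Int) : a % p ≡ a [ZMOD p] :=
  Int.emod_emod_of_dvd a dvd_rfl

-- A's evaluator computes the Horner value mod p (for positive p).
theorem pvEval_aux (p x : Int) (hp : 0 < p) (cs : List Int) : ∀ (a : Int),
    cs.foldl (fun acc c => PySem.Int.mod (acc * x + c) p) (a % p)
      = (cs.foldl (fun acc c => acc * x + c) a) % p := by
  induction cs with
  | nil => intro a; simp
  | cons c t ih =>
    intro a
    simp only [List.foldl_cons]
    rw [PySem.Int.mod_eq_emod_of_pos hp]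
    have hstep : (a % p * x + c) % p = (a * x + c) % p :=
      ((pvModEq_self p a).mul_right x).add_right c
    rw [hstep]
    exact ih (a * x + c)

theorem pvEval_eq (coeffs : List Int) (x p : Int) (hp : 0 < p) :
    evalPolyMod_py coeffs x p = pvHorner coeffs x % p := by
  have h := pvEval_aux p x hp coeffs 0
  rw [Int.zero_emod] at h
  exact h

-- B's ascending running-power evaluator agrees with the Horner value mod p.
theorem pvAsc_aux (p x : Int) (hp : 0 < p) (l : List Int) : ∀ (v q : Int),
    ((l.foldl (fun s c => (s.1 + c * s.2, PySem.Int.mod (s.2 * x) p)) (v, q)).1) % p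
      = (v + q * ∑ k ∈ Finset.range l.length, l.getD k 0 * x ^ k) % p := by
  induction l with
  | nil => intro v q; simp
  | cons c t ih =>
    intro v q
    simp only [List.foldl_cons]
    rw [ih (v + c * q) (PySem.Int.mod (q * x) p)]
    rw [PySem.Int.mod_eq_emod_of_pos hp]
    have hpull : ∀ (w : Int),
        w * ∑ k ∈ Finset.range t.length, t.getD k 0 * x ^ k
          = ∑ k ∈ Finset.range t.length, w * (t.getD k 0 * x ^ k) := by
      intro w; rw [Finset.mul_sum]
    have hmeq : (v + c * q + (q * x % p) * ∑ k ∈ Finset.range t.length, t.getD k 0 * x ^ k) % p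
        = (v + c * q + (q * x) * ∑ k ∈ Finset.range t.length, t.getD k 0 * x ^ k) % p :=
      (((pvModEq_self p (q * x)).mul_right _).add_left (v + c * q))
    rw [hmeq]
    congr 1
    rw [List.length_cons, Finset.sum_range_succ']
    have hf : ∀ k, (c :: t).getD (k + 1) 0 * x ^ (k + 1) = x * (t.getD k 0 * x ^ k) := by
      intro k
      simp [pow_succ]
      ring
    simp only [hf]
    have h0 : (c :: t).getD 0 0 * x ^ 0 = c := by simp
    rw [h0, ← Finset.mul_sum]
    ring

theorem pvAsc (coeffs : List Int) (x p : Int) (hp : 0 < p) :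
    evalAsc_py coeffs x p = pvHorner coeffs x % p := by
  unfold evalAsc_py
  rw [PySem.Int.mod_eq_emod_of_pos hp]
  rw [pvAsc_aux p x hp coeffs.reverse 0 1]
  rw [pvHorner_eq_sum coeffs x]
  simp [List.length_reverse]

-- The abstract forward-difference table at scan position t.
def pvTab (coeffs : List Int) (p : Int) (t : Nat) : List Int :=
  (List.range coeffs.length).map
    (fun k => ((fwdDiff (1 : Int))^[k] (pvHorner coeffs)) (t : Int) % p)

theorem pvTab_length (coeffs : List Int) (p : Int) (t : Nat) :
    (pvTab coeffs p t).length = coeffs.length := by simp [pvTab]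

theorem pvTab_getD (coeffs : List Int) (p : Int) (t : Nat) {k : Nat}
    (hk : k < coeffs.length) :
    (pvTab coeffs p t).getD k 0 = ((fwdDiff (1 : Int))^[k] (pvHorner coeffs)) (t : Int) % p :=
  PySem.List.getD_map_range _ _ _ _ hk


theorem pvDiffs_map (p : Int) (hp : 0 < p) (m : Nat) (g : Int → Int) :
    bDiffs p ((List.range (m + 1)).map (fun i : Nat => g (i : Int) % p))
      = (List.range m).map (fun i : Nat => (fwdDiff (1 : Int) g) (i : Int) % p) := by
  unfold bDiffs
  have hlen : PySem.List.len ((List.range (m + 1)).map (fun i : Nat => g (i : Int) % p)) - 1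
      = ((m : Int)) := by
    simp [PySem.List.len_eq]
  rw [hlen, PySem.List.pyRange_zero_natCast m, List.map_map]
  apply List.map_congr_left
  intro k hk
  have hkm : k < m := List.mem_range.mp hk
  simp only [Function.comp_apply]
  have h1 : ((k : Int) + 1) = (((k + 1 : Nat)) : Int) := by push_cast; ring
  rw [h1, PySem.List.pyGetD_natCast, PySem.List.pyGetD_natCast]
  rw [PySem.List.getD_map_range _ _ _ _ (by omega), PySem.List.getD_map_range _ _ _ _ (by omega)]
  rw [PySem.Int.mod_eq_emod_of_pos hp]
  have hmeq : (g ((k + 1 : Nat) : Int) % p - g (k : Int) % p) % p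
      = (g ((k + 1 : Nat) : Int) - g (k : Int)) % p :=
    ((pvModEq_self p _).sub (pvModEq_self p _))
  rw [hmeq]
  have : (fwdDiff (1 : Int) g) (k : Int) = g ((k : Int) + 1) - g (k : Int) := rfl
  rw [this, h1]

theorem pvTable_build (p : Int) (hp : 0 < p) : ∀ (m : Nat) (g : Int → Int),
    bTable p ((List.range m).map (fun i : Nat => g (i : Int) % p))
      = (List.range m).map (fun k => ((fwdDiff (1 : Int))^[k] g) 0 % p) := by
  intro m
  induction m using Nat.strong_induction_on with
  | _ m ih =>
    intro g
    match m with
    | 0 => simp [bTable]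
    | Nat.succ m' =>
      have hcons : (List.range (m' + 1)).map (fun i : Nat => g (i : Int) % p)
          = (g ((0 : Nat) : Int) % p) ::
            ((List.range m').map (fun i : Nat => g (((Nat.succ i) : Nat) : Int) % p)) := by
        rw [List.range_succ_eq_map, List.map_cons, List.map_map]
        rfl
      rw [hcons, bTable, ← hcons, pvDiffs_map p hp m' g]
      rw [ih m' (by omega) (fwdDiff (1 : Int) g)]
      rw [List.range_succ_eq_map, List.map_cons, List.map_map]
      congr 1


theorem pvStep_aux (p : Int) (n : Nat) (T : List Int) (hT : T.length = n) (hn : 1 ≤ n) :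
    ∀ (d j : Nat), j + d = n - 1 →
    (PySem.List.pyRange (j : Int) ((n : Int) - 1)).foldl
        (fun t k =>
          t.set k.toNat
            (PySem.Int.mod (PySem.List.pyGetD t k 0 + PySem.List.pyGetD t (k + 1) 0) p))
        ((List.range j).map
            (fun k : Nat => PySem.Int.mod (T.getD k 0 + T.getD (k + 1) 0) p) ++ T.drop j)
      = (List.range (n - 1)).map
          (fun k : Nat => PySem.Int.mod (T.getD k 0 + T.getD (k + 1) 0) p) ++ [T.getD (n - 1) 0] := by
  intro d
  induction d with
  | zero =>
    intro j hj
    have hj' : j = n - 1 := by omega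
    subst hj'
    have hn1 : ((n : Int) - 1) = ((n - 1 : Nat) : Int) := by push_cast [hn]; ring
    rw [hn1, PySem.List.pyRange_one_eq_nil le_rfl]
    simp only [List.foldl_nil]
    congr 1
    have hlt : n - 1 < T.length := by omega
    rw [List.drop_eq_getElem_cons hlt]
    have : T.drop (n - 1 + 1) = [] := by
      apply List.drop_eq_nil_of_le
      omega
    rw [this, List.getD_eq_getElem T 0 hlt]
  | succ d ihd =>
    intro j hj
    have hjlt : (j : Int) < (n : Int) - 1 := by
      have : j < n - 1 := by omega
      omega
    rw [PySem.List.pyRange_one_cons hjlt, List.foldl_cons]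
    set f : Nat → Int := fun k : Nat => PySem.Int.mod (T.getD k 0 + T.getD (k + 1) 0) p with hf
    have hjn : j < n := by omega
    have hjn1 : j + 1 < n := by omega
    have hdrop : T.drop j = T[j] :: T.drop (j + 1) := List.drop_eq_getElem_cons (by omega)
    have hdrop1 : T.drop (j + 1) = T[j+1] :: T.drop (j + 2) := List.drop_eq_getElem_cons (by omega)
    set U := (List.range j).map f ++ T.drop j with hU
    have hUlen : ((List.range j).map f).length = j := by simp
    have hget0 : PySem.List.pyGetD U (j : Int) 0 = T.getD j 0 := by
      rw [PySem.List.pyGetD_natCast, hU, List.getD_append_right _ _ _ _ (by omega)]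
      rw [hUlen, Nat.sub_self, hdrop]
      simp
    have hget1 : PySem.List.pyGetD U ((j : Int) + 1) 0 = T.getD (j + 1) 0 := by
      have hcast : ((j : Int) + 1) = ((j + 1 : Nat) : Int) := by push_cast; ring
      rw [hcast, PySem.List.pyGetD_natCast, hU, List.getD_append_right _ _ _ _ (by omega)]
      rw [hUlen, hdrop, hdrop1]
      have : j + 1 - j = 1 := by omega
      rw [this]
      simp
    have hset : U.set ((j : Int)).toNat
        (PySem.Int.mod (T.getD j 0 + T.getD (j + 1) 0) p)
        = (List.range (j + 1)).map f ++ T.drop (j + 1) := by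
      rw [Int.toNat_natCast, hU, List.set_append]
      rw [if_neg (by omega)]
      rw [hUlen, Nat.sub_self]
      rw [List.range_succ, List.map_append]
      rw [hdrop, List.set_cons_zero, List.append_assoc]
      rfl
    rw [hget0, hget1, hset]
    have hcast : ((j : Int) + 1) = ((j + 1 : Nat) : Int) := by push_cast; ring
    rw [hcast]
    exact ihd (j + 1) (by omega)

theorem pvStep_eq (p : Int) (n : Nat) (T : List Int) (hT : T.length = n) (hn : 1 ≤ n) :
    bStep n p T
      = (List.range (n - 1)).map
          (fun k : Nat => PySem.Int.mod (T.getD k 0 + T.getD (k + 1) 0) p) ++ [T.getD (n - 1) 0] := by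
  have h := pvStep_aux p n T hT hn (n - 1) 0 (by omega)
  simpa [bStep] using h


theorem pvTab_step (coeffs : List Int) (p : Int) (hp : 0 < p)
    (hn : 1 ≤ coeffs.length) (t : Nat) :
    bStep coeffs.length p (pvTab coeffs p t) = pvTab coeffs p (t + 1) := by
  set n := coeffs.length with hn'
  set F := pvHorner coeffs with hF
  rw [pvStep_eq p n (pvTab coeffs p t) (pvTab_length coeffs p t) hn]
  have htop : ∀ (y : Int), ((fwdDiff (1 : Int))^[n]) F y = 0 := by
    intro y
    have := pvFwd_top coeffs
    rw [← hn', ← hF] at this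
    rw [this]
    rfl
  have hlast : ((fwdDiff (1 : Int))^[n - 1]) F ((t : Int) + 1)
      = ((fwdDiff (1 : Int))^[n - 1]) F (t : Int) := by
    have h := htop (t : Int)
    have hsucc : n = (n - 1) + 1 := by omega
    rw [hsucc, Function.iterate_succ_apply'] at h
    have : fwdDiff (1 : Int) ((fwdDiff (1 : Int))^[n-1] F) (t : Int)
        = ((fwdDiff (1 : Int))^[n-1] F) ((t : Int) + 1) - ((fwdDiff (1 : Int))^[n-1] F) (t : Int) := rfl
    rw [this] at h
    omega
  have hmap : ∀ k, k < n - 1 →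
      PySem.Int.mod ((pvTab coeffs p t).getD k 0 + (pvTab coeffs p t).getD (k + 1) 0) p
        = ((fwdDiff (1 : Int))^[k]) F ((t : Int) + 1) % p := by
    intro k hk
    rw [pvTab_getD coeffs p t (show k < coeffs.length by omega),
        pvTab_getD coeffs p t (show k + 1 < coeffs.length by omega)]
    rw [PySem.Int.mod_eq_emod_of_pos hp]
    rw [← hF]
    have hmeq : (((fwdDiff (1 : Int))^[k]) F (t : Int) % p
          + ((fwdDiff (1 : Int))^[k + 1]) F (t : Int) % p) % p
        = (((fwdDiff (1 : Int))^[k]) F (t : Int)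
          + ((fwdDiff (1 : Int))^[k + 1]) F (t : Int)) % p :=
      ((pvModEq_self p _).add (pvModEq_self p _))
    rw [hmeq]
    congr 1
    rw [Function.iterate_succ_apply']
    have : fwdDiff (1 : Int) ((fwdDiff (1 : Int))^[k] F) (t : Int)
        = ((fwdDiff (1 : Int))^[k] F) ((t : Int) + 1) - ((fwdDiff (1 : Int))^[k] F) (t : Int) := rfl
    rw [this]
    ring
  have hsucc : n = (n - 1) + 1 := by omega
  conv_rhs => rw [pvTab, ← hn', ← hF, hsucc, List.range_succ, List.map_append]
  congr 1
  · apply List.map_congr_left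
    intro k hk
    have hk' : k < n - 1 := List.mem_range.mp hk
    rw [hmap k hk']
    have : ((t : Int) + 1) = (((t + 1 : Nat)) : Int) := by push_cast; ring
    rw [this]
  · simp only [List.map_cons, List.map_nil]
    rw [pvTab_getD coeffs p t (show n - 1 < coeffs.length by omega), ← hF]
    have hc : (((t + 1 : Nat)) : Int) = (t : Int) + 1 := by push_cast; ring
    rw [hc, hlast]


theorem pvScan (coeffs : List Int) (p : Int) (hp : 0 < p) (hn : 1 ≤ coeffs.length) :
    ∀ (d : Nat) (a : Int), 0 ≤ a → (p - a).toNat = d → ∀ (c : Int),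
    ((PySem.List.pyRange a p).foldl
        (fun st _ => (bStep coeffs.length p st.1,
          if PySem.List.pyGetD st.1 0 0 == 0 then st.2 + 1 else st.2))
        (pvTab coeffs p a.toNat, c)).2
      = c + (((PySem.List.pyRange a p).filter
          (fun x => pvHorner coeffs x % p == 0)).length : Int) := by
  intro d
  induction d with
  | zero =>
    intro a ha hd c
    have hpa : p ≤ a := by omega
    rw [PySem.List.pyRange_one_eq_nil hpa]
    simp
  | succ d ihd =>
    intro a ha hd c
    have hap : a < p := by omega
    rw [PySem.List.pyRange_one_cons hap, List.foldl_cons, List.filter_cons]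
    have hhead : PySem.List.pyGetD (pvTab coeffs p a.toNat) 0 0 = pvHorner coeffs a % p := by
      rw [PySem.List.pyGetD_ofNat' _ 0 0]
      rw [pvTab_getD coeffs p a.toNat (show 0 < coeffs.length by omega)]
      rw [Function.iterate_zero_apply]
      rw [Int.toNat_of_nonneg ha]
    have hstep : bStep coeffs.length p (pvTab coeffs p a.toNat)
        = pvTab coeffs p ((a + 1).toNat) := by
      rw [pvTab_step coeffs p hp hn a.toNat]
      congr 1
      omega
    rw [hhead, hstep]
    have ih := ihd (a + 1) (by omega) (by omega)
    by_cases hz : pvHorner coeffs a % p = 0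
    · rw [if_pos (by simpa using hz), if_pos (by simpa using hz)]
      rw [ih (c + 1)]
      simp only [List.length_cons]
      push_cast
      ring
    · rw [if_neg (by simpa using hz), if_neg (by simpa using hz)]
      exact ih c

theorem pvStep_length (p : Int) (n : Nat) (T : List Int) (hT : T.length = n) (hn : 1 ≤ n) :
    (bStep n p T).length = n := by
  rw [pvStep_eq p n T hT hn]
  simp
  omega

theorem pvDiffAdd (p : Int) (hp : 0 < p) (g : Int → Int) (k : Nat) (y : Int) :
    PySem.Int.mod (((fwdDiff (1 : Int))^[k] g) y % p + ((fwdDiff (1 : Int))^[k + 1] g) y % p) p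
      = ((fwdDiff (1 : Int))^[k] g) (y + 1) % p := by
  rw [PySem.Int.mod_eq_emod_of_pos hp]
  have hmeq := (pvModEq_self p (((fwdDiff (1 : Int))^[k] g) y)).add
    (pvModEq_self p (((fwdDiff (1 : Int))^[k + 1] g) y))
  rw [hmeq]
  congr 1
  rw [Function.iterate_succ_apply']
  have : fwdDiff (1 : Int) ((fwdDiff (1 : Int))^[k] g) y
      = ((fwdDiff (1 : Int))^[k] g) (y + 1) - ((fwdDiff (1 : Int))^[k] g) y := rfl
  rw [this]
  ring

-- Partial-table scan: when the table has only p entries (p < deg+1), entries above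
-- index p-1 can never propagate to the head within p steps, so the head stays exact.
theorem pvScanPartial (coeffs : List Int) (p : Int) (hp : 0 < p) :
    ∀ (d t : Nat), (p - (t : Int)).toNat = d → ∀ (c : Int) (T : List Int),
      T.length = p.toNat →
      (∀ k : Nat, k + t ≤ p.toNat - 1 →
        T.getD k 0 = ((fwdDiff (1 : Int))^[k] (pvHorner coeffs)) (t : Int) % p) →
      ((PySem.List.pyRange (t : Int) p).foldl
          (fun st _ => (bStep p.toNat p st.1,
            if PySem.List.pyGetD st.1 0 0 == 0 then st.2 + 1 else st.2)) (T, c)).2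
        = c + (((PySem.List.pyRange (t : Int) p).filter
            (fun x => pvHorner coeffs x % p == 0)).length : Int) := by
  intro d
  induction d with
  | zero =>
    intro t hd c T hT hinv
    have hpt : p ≤ (t : Int) := by omega
    rw [PySem.List.pyRange_one_eq_nil hpt]
    simp
  | succ d ihd =>
    intro t hd c T hT hinv
    have hm1 : 1 ≤ p.toNat := by omega
    have htp : (t : Int) < p := by omega
    rw [PySem.List.pyRange_one_cons htp, List.foldl_cons, List.filter_cons]
    have hhead : PySem.List.pyGetD T 0 0 = pvHorner coeffs (t : Int) % p := by
      rw [PySem.List.pyGetD_ofNat' _ 0 0]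
      rw [hinv 0 (by omega), Function.iterate_zero_apply]
    have hT' : (bStep p.toNat p T).length = p.toNat := pvStep_length p p.toNat T hT hm1
    have hinv' : ∀ k : Nat, k + (t + 1) ≤ p.toNat - 1 →
        (bStep p.toNat p T).getD k 0
          = ((fwdDiff (1 : Int))^[k] (pvHorner coeffs)) (((t + 1 : Nat)) : Int) % p := by
      intro k hk
      rw [pvStep_eq p p.toNat T hT hm1]
      have hklt : k < p.toNat - 1 := by omega
      rw [List.getD_append _ _ _ k (by simpa using hklt)]
      rw [PySem.List.getD_map_range _ _ _ _ hklt]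
      rw [hinv k (by omega), hinv (k + 1) (by omega)]
      rw [pvDiffAdd p hp (pvHorner coeffs) k (t : Int)]
      have hc : ((t : Int) + 1) = (((t + 1 : Nat)) : Int) := by push_cast; ring
      rw [hc]
    have ih := fun c' => ihd (t + 1) (by omega) c' (bStep p.toNat p T) hT' hinv'
    rw [hhead]
    have hc1 : ((t : Int) + 1) = (((t + 1 : Nat)) : Int) := by push_cast; ring
    rw [hc1]
    by_cases hz : pvHorner coeffs (t : Int) % p = 0
    · rw [if_pos (by simpa using hz), if_pos (by simpa using hz)]
      rw [ih (c + 1)]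
      simp only [List.length_cons]
      push_cast
      ring
    · rw [if_neg (by simpa using hz), if_neg (by simpa using hz)]
      exact ih c

theorem pvClassify (c : Int) :
    PySem.Dict.getD
        (((PySem.Dict.empty.insert (0 : Int) "3").insert 1 "12").insert 3 "111") c "bad"
      = if c = 0 then "3" else if c = 1 then "12" else if c = 3 then "111" else "bad" := by
  have hd : (((PySem.Dict.empty.insert (0 : Int) "3").insert 1 "12").insert 3 "111")
      = PySem.Dict.mk [((0 : Int), "3"), (1, "12"), (3, "111")] := by decide
  rw [hd]
  simp only [PySem.Dict.getD, PySem.Dict.get?_mk_cons, beq_iff_eq]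
  rcases eq_or_ne c 0 with rfl|h0
  · simp
  · rw [if_neg (Ne.symm h0), if_neg h0]
    rcases eq_or_ne c 1 with rfl|h1
    · simp
    · rw [if_neg (Ne.symm h1), if_neg h1]
      rcases eq_or_ne c 3 with rfl|h3
      · simp
      · rw [if_neg (Ne.symm h3), if_neg h3]
        simp [PySem.Dict.get?]

theorem pvFinal (len : Nat) (c : Int) (h : c = (len : Int)) :
    (if len == 0 then "3" else if len == 1 then "12"
      else if len == 3 then "111" else "bad")
      = (if c = 0 then "3" else if c = 1 then "12" else if c = 3 then "111" else "bad") := by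
  subst h
  simp only [beq_iff_eq]
  split_ifs <;> first | rfl | omega

theorem pvMain (coeffs : List Int) (p : Int) :
    cubic_splitting_type_mod_p_py coeffs p = cubic_splitting_type_mod_p_py_alt coeffs p := by
  by_cases hp : 1 ≤ p
  · have hp0 : 0 < p := by omega
    by_cases hn0 : coeffs.length = 0
    · -- zero polynomial: every residue is a root
      have hnil : coeffs = [] := List.length_eq_zero_iff.mp hn0
      subst hnil
      have hfilter : (PySem.List.pyRange 0 p).filter
          (fun x => evalPolyMod_py [] x p == 0) = PySem.List.pyRange 0 p :=
        List.filter_eq_self.mpr (fun x _ => by simp [evalPolyMod_py])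
      simp only [cubic_splitting_type_mod_p_py, cubic_splitting_type_mod_p_py_alt,
        List.length_nil]
      rw [hfilter, PySem.List.length_pyRange_one]
      rw [if_pos hp, if_true, pvClassify]
      exact pvFinal _ p (by omega)
    · have hn : 1 ≤ coeffs.length := by omega
      -- A side
      have hfilt : (PySem.List.pyRange 0 p).filter (fun x => evalPolyMod_py coeffs x p == 0)
          = (PySem.List.pyRange 0 p).filter (fun x => pvHorner coeffs x % p == 0) :=
        List.filter_congr (fun x _ => by rw [pvEval_eq coeffs x p hp0])
      -- B side pieces
      have hmcast : (min ((coeffs.length : Int)) p) = ((min coeffs.length p.toNat : Nat) : Int) := by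
        omega
      have hvals : (PySem.List.pyRange 0 (min ((coeffs.length : Int)) p)).map
            (fun x => evalAsc_py coeffs x p)
          = (List.range (min coeffs.length p.toNat)).map
              (fun i : Nat => pvHorner coeffs (i : Int) % p) := by
        rw [hmcast, PySem.List.pyRange_zero_natCast, List.map_map]
        apply List.map_congr_left
        intro k _
        simp only [Function.comp_apply]
        exact pvAsc coeffs (k : Int) p hp0
      have htab : bTable p ((List.range (min coeffs.length p.toNat)).map
            (fun i : Nat => pvHorner coeffs (i : Int) % p))
          = (List.range (min coeffs.length p.toNat)).map
              (fun k => ((fwdDiff (1 : Int))^[k] (pvHorner coeffs)) 0 % p) :=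
        pvTable_build p hp0 _ (pvHorner coeffs)
      have hms : (min ((coeffs.length : Int)) p).toNat = min coeffs.length p.toNat := by omega
      simp only [cubic_splitting_type_mod_p_py, cubic_splitting_type_mod_p_py_alt]
      rw [hfilt, if_pos hp, if_neg hn0, hvals, htab, hms]
      by_cases hle : coeffs.length ≤ p.toNat
      · have hmn : min coeffs.length p.toNat = coeffs.length := min_eq_left hle
        rw [hmn]
        have htab0 : (List.range coeffs.length).map
            (fun k => ((fwdDiff (1 : Int))^[k] (pvHorner coeffs)) 0 % p)
            = pvTab coeffs p ((0 : Int).toNat) := rfl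
        rw [htab0, pvScan coeffs p hp0 hn (p - 0).toNat 0 le_rfl rfl 0, pvClassify]
        apply pvFinal
        ring
      · have hmn : min coeffs.length p.toNat = p.toNat := min_eq_right (by omega)
        rw [hmn]
        have hT0len : ((List.range p.toNat).map
            (fun k => ((fwdDiff (1 : Int))^[k] (pvHorner coeffs)) 0 % p)).length = p.toNat := by
          simp
        have hinv0 : ∀ k : Nat, k + 0 ≤ p.toNat - 1 →
            ((List.range p.toNat).map
              (fun k => ((fwdDiff (1 : Int))^[k] (pvHorner coeffs)) 0 % p)).getD k 0
              = ((fwdDiff (1 : Int))^[k] (pvHorner coeffs)) (((0 : Nat)) : Int) % p := by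
          intro k hk
          exact PySem.List.getD_map_range _ _ _ _ (by omega)
        have hscan := pvScanPartial coeffs p hp0 (p - ((0 : Nat) : Int)).toNat 0 rfl 0 _ hT0len hinv0
        simp only [Nat.cast_zero] at hscan
        rw [hscan, pvClassify]
        apply pvFinal
        ring
  · have hple : p ≤ 0 := by omega
    simp only [cubic_splitting_type_mod_p_py, cubic_splitting_type_mod_p_py_alt, if_neg hp]
    rw [PySem.List.pyRange_one_eq_nil hple]
    rw [pvClassify]
    simp

-- ===== VERDICT (by name: the statement is the Claim_ definition above) =====
theorem cubic_splitting_type_mod_p_py_spec : Claim_equal_cubic_splitting_type_mod_p_py := by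
  intro coeffs p _
  unfold Spec_cubic_splitting_type_mod_p_py
  exact pvMain coeffs p
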